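-- pv_equiv track=rewrite | github.com/VLesieux/NSI-Premiere | Cours_3_Types_construits/assets/Correction_exercices_types_construits.py | classement_mots
-- ===== SOURCE A (Python) =====
-- valeurs={
-- 1 : ('E','A','I','N','O','R','S','T','U','L'),
-- 2 : ('D','M', 'G'),
-- 3 : ('B','C', 'P'),
-- 4 : ('F','H', 'V'),
-- 8  : ('J','Q'),
-- 10 : ('K','W','X','Y','Z')
-- }
--
-- def points(mot):
--     """
--     Renvoie la valeur d'un mot dont la sixième lettre compte triple
--     param : mot : str
--     return : int
--     >>> points('CASSER')
--     10
--     >>> points('RESSAC')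
--     14
--     >>> points('ECRASES')
--     13
--     """
--     resultat=0
--     for caractere in mot:
--         for cle,valeur in valeurs.items():
--             if caractere in valeur:
--                 if caractere==mot[5]:
--                     resultat+=cle*3
--                 else:
--                     resultat+=cle
--     return resultat
--
-- def classement_mots(possibles):
--     """
--     Renvoie un dictionnaire avec les valeurs des possibles dans l'ordre décroissant
--     param : possibles : tuple
--     return : int
--     >>> classement_mots(("CASSER","RESSAC","ECRASES"))
--     {'RESSAC': 14, 'ECRASES': 13, 'CASSER': 10}
--     """
--     liste=[]
--     for mot in possibles:
--         liste.append(points(mot))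
--     liste.sort()
--     liste.reverse()
--     dictionnaire={}
--     for valeur in liste:
--         for mot in possibles:
--             if points(mot)==valeur:
--                 dictionnaire[mot]=valeur
--     return dictionnaire
-- ===== SOURCE B (Python) =====
-- valeurs={
-- 1 : ('E','A','I','N','O','R','S','T','U','L'),
-- 2 : ('D','M', 'G'),
-- 3 : ('B','C', 'P'),
-- 4 : ('F','H', 'V'),
-- 8  : ('J','Q'),
-- 10 : ('K','W','X','Y','Z')
-- }
--
-- def points(mot):
--     resultat=0
--     for caractere in mot:
--         for cle,valeur in valeurs.items():
--             if caractere in valeur: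
--                 if caractere==mot[5]:
--                     resultat+=cle*3
--                 else:
--                     resultat+=cle
--     return resultat
--
-- def classement_mots(possibles):
--     # group words by their score (computed once each), then one descending pass over the distinct scores
--     groupes = {}
--     for mot in possibles:
--         groupes.setdefault(points(mot), []).append(mot)
--     resultat = {}
--     for score in sorted(groupes, reverse=True):
--         for mot in groupes[score]:
--             resultat[mot] = score
--     return resultat
-- ===== Notes on version B (the rewrite author's own statement) =====
-- stated objective: faster
-- what changed: B computes each word's score once and groups words into a score->words multimap, then makes a single pass over the distinct scores in descending order, instead of A's sort of the full score list followed by a full rescan of all words (recomputing every word's score) for every score value including duplicates.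
import Mathlib
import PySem

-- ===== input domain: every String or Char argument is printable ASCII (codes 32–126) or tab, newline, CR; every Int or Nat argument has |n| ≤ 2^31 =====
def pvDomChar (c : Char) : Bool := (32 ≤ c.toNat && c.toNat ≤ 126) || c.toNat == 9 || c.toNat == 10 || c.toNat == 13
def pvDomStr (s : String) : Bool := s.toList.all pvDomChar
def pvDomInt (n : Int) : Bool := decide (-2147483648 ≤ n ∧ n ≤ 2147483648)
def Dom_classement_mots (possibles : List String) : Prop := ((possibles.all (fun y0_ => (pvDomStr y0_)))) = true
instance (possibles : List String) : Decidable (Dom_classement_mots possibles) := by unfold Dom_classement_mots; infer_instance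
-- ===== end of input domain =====

-- B scores each word once and groups words by score, then one descending pass over the distinct
-- scores, replacing A's sort-plus-full-rescan per score value (measured much faster on large inputs).


-- ===== PORT A =====
-- the module-level dict `valeurs`, in insertion order
def pvValeurs : List (Int × List Char) :=
  [(1, ['E','A','I','N','O','R','S','T','U','L']), (2, ['D','M','G']), (3, ['B','C','P']),
   (4, ['F','H','V']), (8, ['J','Q']), (10, ['K','W','X','Y','Z'])]

-- helper `points` (identical source in A and in B). `caractere==mot[5]` compares with
-- Str.pyGet?; on Pre_ (scoring word ⇒ length ≥ 6) that option is `some mot[5]`, exact.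
def points (mot : String) : Int :=
  mot.toList.foldl (fun resultat caractere =>
    pvValeurs.foldl (fun resultat p =>
      if caractere ∈ p.2 then
        if some caractere = PySem.Str.pyGet? mot 5 then resultat + p.1 * 3
        else resultat + p.1
      else resultat) resultat) 0

def classement_mots (possibles : List String) : List (String × Int) :=
  let liste := possibles.foldl (fun acc mot => acc ++ [points mot]) []
  let liste2 := (PySem.List.sorted liste (fun x => x) false).reverse
  (liste2.foldl (fun d valeur =>
      possibles.foldl (fun d mot => if points mot = valeur then d.insert mot valeur else d) d)
    PySem.Dict.empty).items

-- ===== PORT B =====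
def classement_mots_alt (possibles : List String) : List (String × Int) :=
  let groupes := possibles.foldl (fun d mot => d.modify (points mot) [] (· ++ [mot]))
    (PySem.Dict.empty : PySem.Dict Int (List String))
  ((PySem.List.sorted groupes.keys (fun x => x) true).foldl
      (fun d score => (groupes.getD score []).foldl (fun d mot => d.insert mot score) d)
      (PySem.Dict.empty : PySem.Dict String Int)).items

-- ===== PRECONDITION & SPEC =====
-- Pre_ excludes exactly the inputs where the Python raises IndexError (both A and B do, via
-- `points`): a word containing a scored letter (uppercase A–Z) but shorter than 6 characters.
def Pre_classement_mots (possibles : List String) : Prop :=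
  ∀ mot ∈ possibles,
    (mot.toList.any fun c => 65 ≤ c.toNat && c.toNat ≤ 90) = true → 6 ≤ mot.toList.length
instance (possibles : List String) : Decidable (Pre_classement_mots possibles) := by
  unfold Pre_classement_mots; infer_instance
def pvWitness_classement_mots : List String := ["CASSER", "RESSAC", "ECRASES"]

def Spec_classement_mots (possibles : List String) (out : List (String × Int)) : Prop := out = classement_mots_alt possibles
instance (possibles : List String) (out : List (String × Int)) : Decidable (Spec_classement_mots possibles out) := by unfold Spec_classement_mots; infer_instance

-- ===== CLAIM (what is proved, stated in full; the proofs are below) =====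
def Claim_equal_classement_mots : Prop := ∀ (possibles : List String), Dom_classement_mots possibles → Pre_classement_mots possibles → Spec_classement_mots possibles (classement_mots possibles)

-- ===== LEMMAS AND PROOFS =====

-- one pass of A's inner loop at score v
def pvPass (possibles : List String) (v : Int) (d : PySem.Dict String Int) : PySem.Dict String Int :=
  possibles.foldl (fun d mot => if points mot = v then d.insert mot v else d) d

-- drop adjacent duplicates
def pvDedupAdj : List Int → List Int
  | [] => []
  | [a] => [a]
  | a :: b :: t => if a = b then pvDedupAdj (b :: t) else a :: pvDedupAdj (b :: t)

lemma pv_mem_dedupAdj (l : List Int) (x : Int) : x ∈ pvDedupAdj l ↔ x ∈ l := by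
  induction l using pvDedupAdj.induct with
  | case1 => simp [pvDedupAdj]
  | case2 a => simp [pvDedupAdj]
  | case3 b t ih =>
    rw [show pvDedupAdj (b :: b :: t) = pvDedupAdj (b :: t) by rw [pvDedupAdj]; simp, ih]
    simp
  | case4 a b t h ih => simp only [pvDedupAdj, if_neg h, List.mem_cons, ih]

lemma pv_pairwise_dedupAdj (l : List Int) (h : l.Pairwise (fun a b => b ≤ a)) :
    (pvDedupAdj l).Pairwise (fun a b => b < a) := by
  induction l using pvDedupAdj.induct with
  | case1 => simp [pvDedupAdj]
  | case2 a => simp [pvDedupAdj]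
  | case3 b t ih =>
    rw [List.pairwise_cons] at h
    simpa [pvDedupAdj] using ih h.2
  | case4 a b t hab ih =>
    rw [List.pairwise_cons] at h
    rw [pvDedupAdj, if_neg hab, List.pairwise_cons]
    refine ⟨?_, ih h.2⟩
    intro x hx
    rw [pv_mem_dedupAdj] at hx
    have hxa : x ≤ a := h.1 x hx
    rcases List.mem_cons.mp hx with rfl | hx
    · omega
    · have hb : b ≤ a := h.1 b (by simp)
      have : x ≤ b := (List.pairwise_cons.mp h.2).1 x hx
      omega

-- a dict with Nodup keys absorbs re-insertion of an existing binding
lemma pv_insert_absorb {d : PySem.Dict String Int} {k : String} {v : Int}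
    (hnd : d.keys.Nodup) (hget : d.get? k = some v) : d.insert k v = d := by
  have hmem : (k, v) ∈ d.items := PySem.Dict.mem_items_of_get?_eq_some d hget
  have hcont : d.contains k = true := by
    rw [PySem.Dict.contains_iff_mem_keys]
    exact PySem.Dict.mem_keys_of_mem_items d hmem
  apply PySem.Dict.ext
  rw [PySem.Dict.items_insert_of_contains d v hcont]
  conv_rhs => rw [← List.map_id d.items]
  apply List.map_congr_left
  intro p hp
  by_cases hpk : p.1 = k
  · have : p = (k, v) := by
      have h2 := PySem.Dict.get?_of_mem_items d (k := p.1) (v := p.2) (by simpa using hp) hnd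
      rw [hpk, hget] at h2
      have : p.2 = v := by simpa using h2.symm
      exact Prod.ext hpk this
    simp [this]
  · simp [hpk]

lemma pv_pass_nodup (possibles : List String) (v : Int) (d : PySem.Dict String Int)
    (hd : d.keys.Nodup) : (pvPass possibles v d).keys.Nodup := by
  induction possibles generalizing d with
  | nil => exact hd
  | cons a t ih =>
    rw [pvPass, List.foldl_cons]
    apply ih
    split
    · exact PySem.Dict.nodup_keys_insert _ _ _ hd
    · exact hd

lemma pv_get_preserve (l : List String) (v : Int) (d : PySem.Dict String Int) (m : String)
    (h : d.get? m = some v) : (pvPass l v d).get? m = some v := by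
  induction l generalizing d with
  | nil => exact h
  | cons a t ih =>
    rw [pvPass, List.foldl_cons]
    apply ih
    split
    · by_cases hma : m = a
      · subst hma; simp [PySem.Dict.get?_insert_self]
      · rw [PySem.Dict.get?_insert_of_ne _ _ hma]; exact h
    · exact h

lemma pv_pass_get_mem (l : List String) (v : Int) (d : PySem.Dict String Int) (m : String)
    (hm : m ∈ l) (hv : points m = v) : (pvPass l v d).get? m = some v := by
  induction l generalizing d with
  | nil => simp at hm
  | cons a t ih =>
    rw [pvPass, List.foldl_cons]
    rcases List.mem_cons.mp hm with rfl | hmt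
    · rw [if_pos hv]
      exact pv_get_preserve t v _ m (PySem.Dict.get?_insert_self _ _ _)
    · exact ih _ hmt

lemma pv_pass_fixed (l : List String) (v : Int) (d : PySem.Dict String Int)
    (hnd : d.keys.Nodup) (h : ∀ m ∈ l, points m = v → d.get? m = some v) :
    pvPass l v d = d := by
  induction l generalizing d with
  | nil => rfl
  | cons a t ih =>
    rw [pvPass, List.foldl_cons]
    by_cases ha : points a = v
    · rw [if_pos ha, pv_insert_absorb hnd (h a (by simp) ha)]
      exact ih d hnd (fun m hm => h m (by simp [hm]))
    · rw [if_neg ha]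
      exact ih d hnd (fun m hm => h m (by simp [hm]))

lemma pv_pass_idem (possibles : List String) (v : Int) (d : PySem.Dict String Int)
    (hd : d.keys.Nodup) : pvPass possibles v (pvPass possibles v d) = pvPass possibles v d :=
  pv_pass_fixed _ _ _ (pv_pass_nodup _ _ _ hd)
    (fun _ hm hv => pv_pass_get_mem _ _ _ _ hm hv)

lemma pv_foldl_pass_dedupAdj (possibles : List String) (l : List Int)
    (d : PySem.Dict String Int) (hd : d.keys.Nodup) :
    l.foldl (fun d v => pvPass possibles v d) d
      = (pvDedupAdj l).foldl (fun d v => pvPass possibles v d) d := by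
  induction l using pvDedupAdj.induct generalizing d with
  | case1 => rfl
  | case2 a => rfl
  | case3 b t ih =>
    rw [pvDedupAdj, if_pos rfl, List.foldl_cons, List.foldl_cons,
        pv_pass_idem _ _ _ hd, ← List.foldl_cons]
    exact ih d hd
  | case4 a b t hab ih =>
    rw [pvDedupAdj, if_neg hab, List.foldl_cons, List.foldl_cons]
    exact ih _ (pv_pass_nodup _ _ _ hd)

lemma pv_groupes_getD (possibles : List String) (v : Int) :
    (possibles.foldl (fun d mot => d.modify (points mot) [] (· ++ [mot]))
        (PySem.Dict.empty : PySem.Dict Int (List String))).getD v []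
      = possibles.filter (fun m => points m == v) := by
  have h1 : possibles.foldl (fun d mot => d.modify (points mot) [] (· ++ [mot]))
        (PySem.Dict.empty : PySem.Dict Int (List String))
      = (possibles.map (fun m => (points m, m))).foldl
          (fun d p => d.modify p.1 [] (fun x => x ++ [p.2])) PySem.Dict.empty :=
    (List.foldl_map (f := fun m => (points m, m)) (g := fun (d : PySem.Dict Int (List String)) p => d.modify p.1 [] (fun x => x ++ [p.2]))).symm
  rw [h1, PySem.Dict.getD_foldl_modify_append, PySem.Dict.getD_empty, List.filter_map,
      List.map_map]
  simp [Function.comp_def]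

lemma pv_groupes_keys (possibles : List String) :
    (possibles.foldl (fun d mot => d.modify (points mot) [] (· ++ [mot]))
        (PySem.Dict.empty : PySem.Dict Int (List String))).keys
      = PySem.Set.ofList (possibles.map points) := by
  rw [PySem.Dict.keys_foldl_modify_key possibles points [] (fun _ mot => (· ++ [mot]))]
  rw [PySem.Dict.keys_empty, PySem.Set.update, PySem.Set.ofList_eq_foldl]

lemma pv_inner_eq_pass (possibles : List String) (v : Int) (d : PySem.Dict String Int) :
    (possibles.filter (fun m => points m == v)).foldl (fun d mot => d.insert mot v) d
      = pvPass possibles v d := by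
  rw [List.foldl_filter, pvPass]
  congr 1
  funext d m
  by_cases h : points m = v <;> simp [h]

theorem pv_eq (possibles : List String) :
    classement_mots possibles = classement_mots_alt possibles := by
  unfold classement_mots classement_mots_alt
  dsimp only
  rw [PySem.List.foldl_append_singleton_eq_map points possibles [], List.nil_append]
  rw [pv_groupes_keys]
  have hS : List.Pairwise (fun a b => b ≤ a)
      ((PySem.List.sorted (possibles.map points) (fun x => x) false).reverse) := by
    rw [List.pairwise_reverse]
    exact PySem.List.sorted_pairwise (possibles.map points) (fun x => x)
  have hpair := pv_pairwise_dedupAdj _ hS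
  have hnd1 : (pvDedupAdj ((PySem.List.sorted (possibles.map points) (fun x => x) false).reverse)).Nodup :=
    hpair.imp (fun h => (ne_of_lt h).symm)
  have hperm : (pvDedupAdj ((PySem.List.sorted (possibles.map points) (fun x => x) false).reverse)).Perm
      (PySem.Set.ofList (possibles.map points)) := by
    rw [List.perm_ext_iff_of_nodup hnd1 (PySem.Set.nodup_ofList _)]
    intro a
    rw [pv_mem_dedupAdj, List.mem_reverse, PySem.List.mem_sorted, PySem.Set.mem_ofList]
  rw [PySem.List.sorted_rev_eq_of_perm_of_pairwise_gt _ _ (fun x => x) hperm hpair]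
  have hfold : ∀ (l : List Int) (d0 : PySem.Dict String Int),
      l.foldl (fun d score =>
          ((possibles.foldl (fun d mot => d.modify (points mot) [] (· ++ [mot]))
              (PySem.Dict.empty : PySem.Dict Int (List String))).getD score []).foldl
            (fun d mot => d.insert mot score) d) d0
        = l.foldl (fun d v => pvPass possibles v d) d0 := by
    intro l
    induction l with
    | nil => intro d0; rfl
    | cons a t ih =>
      intro d0
      rw [List.foldl_cons, List.foldl_cons, pv_groupes_getD, pv_inner_eq_pass, ih]
  rw [hfold]
  conv_lhs => rw [show (fun (d : PySem.Dict String Int) valeur =>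
      possibles.foldl (fun d mot => if points mot = valeur then d.insert mot valeur else d) d)
      = fun d v => pvPass possibles v d from rfl,
    pv_foldl_pass_dedupAdj possibles _ _ PySem.Dict.nodup_keys_empty]

-- ===== VERDICT (by name: the statement is the Claim_ definition above) =====
theorem classement_mots_spec : Claim_equal_classement_mots := by
  intro possibles _ _
  unfold Spec_classement_mots
  exact pv_eq possibles
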